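-- pv_equiv track=rewrite | github.com/kmgyu/embedded-system-midi-parser | main.py | distribute_tasks
-- ===== SOURCE A (Python) =====
-- def distribute_tasks(n, tasks):
--     # 간단한 태스크 스케줄링
--     # n개의 햄스터(부저) 리스트 초기화
--     buzzers = [[] for _ in range(n)]
--     available_time = [0] * n  # 각 부저의 사용 가능 시간 초기화
--
--     # 주어진 작업을 시작 시간에 맞춰 부저에 분배
--     for task in tasks:
--         hertz, duration, start_time = task
--         # 가장 먼저 작업을 수행할 수 있는 부저 찾기
--         for i in range(n):
--             if available_time[i] <= start_time:
--                 buzzers[i].append(task)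
--                 available_time[i] = start_time + duration  # 부저의 사용 가능 시간 업데이트
--                 break
--
--     return buzzers
-- ===== SOURCE B (Python) =====
-- # Segment tree over available times: leftmost buzzer with avail <= start via a min-tree descent.
-- # Tree nodes: ('L', avail) leaves, ('N', size, min, left, right) internal nodes.
--
-- def _build(k):
--     if k <= 1:
--         return ('L', 0)
--     half = k // 2
--     return ('N', k, 0, _build(half), _build(k - half))
--
-- def _size(t):
--     return 1 if t[0] == 'L' else t[1]
--
-- def _min(t):
--     return t[1] if t[0] == 'L' else t[2]
--
-- def _query(t, s):
--     # leftmost leaf index with value <= s, else None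
--     if t[0] == 'L':
--         return 0 if t[1] <= s else None
--     left, right = t[3], t[4]
--     if _min(left) <= s:
--         return _query(left, s)
--     r = _query(right, s)
--     return None if r is None else r + _size(left)
--
-- def _update(t, i, v):
--     if t[0] == 'L':
--         return ('L', v)
--     sz, left, right = t[1], t[3], t[4]
--     if i < _size(left):
--         left = _update(left, i, v)
--     else:
--         right = _update(right, i - _size(left), v)
--     return ('N', sz, min(_min(left), _min(right)), left, right)
--
-- def distribute_tasks(n, tasks):
--     if n <= 0:
--         return []
--     buzzers = [[] for _ in range(n)]
--     tree = _build(n)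
--     for task in tasks:
--         hertz, duration, start_time = task
--         i = _query(tree, start_time)
--         if i is not None:
--             buzzers[i].append(task)
--             tree = _update(tree, i, start_time + duration)
--     return buzzers
-- ===== Notes on version B (the rewrite author's own statement) =====
-- stated objective: alternative
-- what changed: A's inner linear scan over the buzzers per task is replaced by an immutable segment tree over the available times (leftmost-index-with-min-<=-start query plus point update per task); same results, different data structure and traversal.
import Mathlib
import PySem

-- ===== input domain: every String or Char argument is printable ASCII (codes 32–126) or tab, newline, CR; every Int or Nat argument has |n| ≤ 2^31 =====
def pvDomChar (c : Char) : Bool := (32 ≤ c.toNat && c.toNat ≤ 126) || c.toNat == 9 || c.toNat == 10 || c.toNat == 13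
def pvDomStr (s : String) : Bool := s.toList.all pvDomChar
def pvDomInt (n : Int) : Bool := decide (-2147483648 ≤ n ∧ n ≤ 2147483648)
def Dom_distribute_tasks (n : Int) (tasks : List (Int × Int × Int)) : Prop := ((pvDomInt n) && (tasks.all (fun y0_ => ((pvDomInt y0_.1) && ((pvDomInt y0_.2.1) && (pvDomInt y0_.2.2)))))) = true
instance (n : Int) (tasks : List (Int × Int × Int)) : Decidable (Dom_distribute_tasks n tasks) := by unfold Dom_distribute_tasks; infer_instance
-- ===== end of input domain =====

-- B replaces A's inner linear scan for the first free buzzer by a segment tree over the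
-- available times (leftmost-index-with-min-≤-start query + point update): an alternative
-- algorithm and data structure; not measurably faster on the timed inputs.

-- ===== PORT A =====
-- A's inner loop: 'for i in range(n): if available_time[i] <= start_time: … break' — the
-- linear scan for the first index whose available time is ≤ start_time.
def pyFindBuzzer : List Int → Int → Option Nat
  | [], _ => none
  | a :: rest, st => if a ≤ st then some 0 else (pyFindBuzzer rest st).map (· + 1)

-- one iteration of A's 'for task in tasks' loop over the state (buzzers, available_time)
def stepA (st : List (List (Int × Int × Int)) × List Int) (task : Int × Int × Int) :
    List (List (Int × Int × Int)) × List Int :=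
  match pyFindBuzzer st.2 task.2.2 with
  | none => st
  | some i => (st.1.modify i (· ++ [task]), st.2.set i (task.2.2 + task.2.1))

def distribute_tasks (n : Int) (tasks : List (Int × Int × Int)) : List (List (Int × Int × Int)) :=
  -- range(n) is empty for n ≤ 0, so the lists have n.toNat elements
  (tasks.foldl stepA (List.replicate n.toNat [], List.replicate n.toNat 0)).1

-- ===== PORT B =====
-- segment tree of Source B: leaf avail | node size min left right
inductive Seg
  | leaf : Int → Seg
  | node : Nat → Int → Seg → Seg → Seg
deriving Repr

def Seg.size : Seg → Nat
  | .leaf _ => 1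
  | .node sz _ _ _ => sz

def Seg.mn : Seg → Int
  | .leaf v => v
  | .node _ m _ _ => m

def Seg.build : Nat → Seg
  | 0 => .leaf 0
  | 1 => .leaf 0
  | (k+2) => .node (k+2) 0 (Seg.build ((k+2)/2)) (Seg.build ((k+2) - (k+2)/2))
decreasing_by all_goals omega

def Seg.query : Seg → Int → Option Nat
  | .leaf v, s => if v ≤ s then some 0 else none
  | .node _ _ l r, s => if l.mn ≤ s then l.query s else (r.query s).map (· + l.size)

def Seg.update : Seg → Nat → Int → Seg
  | .leaf _, _, v => .leaf v
  | .node sz _ l r, i, v =>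
    if i < l.size then
      let l' := l.update i v
      .node sz (min l'.mn r.mn) l' r
    else
      let r' := r.update (i - l.size) v
      .node sz (min l.mn r'.mn) l r'

-- one iteration of Source B's 'for task in tasks' loop over the state (buzzers, tree)
def stepB (st : List (List (Int × Int × Int)) × Seg) (task : Int × Int × Int) :
    List (List (Int × Int × Int)) × Seg :=
  match st.2.query task.2.2 with
  | none => st
  | some i => (st.1.modify i (· ++ [task]), st.2.update i (task.2.2 + task.2.1))

def distribute_tasks_alt (n : Int) (tasks : List (Int × Int × Int)) : List (List (Int × Int × Int)) :=
  if n ≤ 0 then []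
  else (tasks.foldl stepB (List.replicate n.toNat [], Seg.build n.toNat)).1

-- ===== PRECONDITION & SPEC =====
def Spec_distribute_tasks (n : Int) (tasks : List (Int × Int × Int)) (out : List (List (Int × Int × Int))) : Prop := out = distribute_tasks_alt n tasks
instance (n : Int) (tasks : List (Int × Int × Int)) (out : List (List (Int × Int × Int))) : Decidable (Spec_distribute_tasks n tasks out) := by unfold Spec_distribute_tasks; infer_instance

-- ===== CLAIM (what is proved, stated in full; the proofs are below) =====
def Claim_equal_distribute_tasks : Prop := ∀ (n : Int) (tasks : List (Int × Int × Int)), Dom_distribute_tasks n tasks → Spec_distribute_tasks n tasks (distribute_tasks n tasks)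

-- ===== LEMMAS AND PROOFS =====

-- the list of available times a tree represents, and well-formedness of the cached fields
def Seg.toList : Seg → List Int
  | .leaf v => [v]
  | .node _ _ l r => l.toList ++ r.toList

def Seg.Wf : Seg → Prop
  | .leaf _ => True
  | .node sz m l r => Seg.Wf l ∧ Seg.Wf r ∧ sz = l.size + r.size ∧ m = min l.mn r.mn

theorem pyFindBuzzer_eq_findIdx? (l : List Int) (st : Int) :
    pyFindBuzzer l st = List.findIdx? (fun a => decide (a ≤ st)) l := by
  induction l with
  | nil => rfl
  | cons a rest ih => simp [pyFindBuzzer, List.findIdx?_cons, ih]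

theorem Seg.length_toList (t : Seg) (hw : t.Wf) : t.toList.length = t.size := by
  induction t with
  | leaf v => rfl
  | node sz m l r ihl ihr =>
    obtain ⟨hl, hr, hsz, _⟩ := hw
    simp [Seg.toList, Seg.size, ihl hl, ihr hr, hsz]

theorem Seg.mn_le_iff (t : Seg) (hw : t.Wf) (s : Int) :
    t.mn ≤ s ↔ ∃ x ∈ t.toList, x ≤ s := by
  induction t with
  | leaf v => simp [Seg.mn, Seg.toList]
  | node sz m l r ihl ihr =>
    obtain ⟨hl, hr, _, hm⟩ := hw
    rw [show Seg.mn (.node sz m l r) = m from rfl, hm, min_le_iff, ihl hl, ihr hr]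
    simp only [Seg.toList, List.mem_append]
    aesop

theorem Seg.query_eq (t : Seg) (hw : t.Wf) (s : Int) :
    t.query s = List.findIdx? (fun a => decide (a ≤ s)) t.toList := by
  induction t with
  | leaf v => simp [Seg.query, Seg.toList, List.findIdx?_cons]
  | node sz m l r ihl ihr =>
    obtain ⟨hl, hr, _, _⟩ := hw
    simp only [Seg.query, Seg.toList, List.findIdx?_append]
    by_cases h : l.mn ≤ s
    · rw [if_pos h, ihl hl]
      rcases hq : List.findIdx? (fun a => decide (a ≤ s)) l.toList with _ | j
      · exfalso
        rw [List.findIdx?_eq_none_iff] at hq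
        obtain ⟨x, hx, hxs⟩ := (Seg.mn_le_iff l hl s).1 h
        simpa [hxs] using hq x hx
      · simp
    · rw [if_neg h, ihr hr]
      have hnone : List.findIdx? (fun a => decide (a ≤ s)) l.toList = none := by
        rw [List.findIdx?_eq_none_iff]
        intro x hx
        by_contra hxs
        exact h ((Seg.mn_le_iff l hl s).2 ⟨x, hx, by simpa using hxs⟩)
      simp [hnone, Seg.length_toList l hl]

theorem Seg.update_spec (t : Seg) (i : Nat) (v : Int) (hw : t.Wf) (hi : i < t.size) :
    (t.update i v).toList = t.toList.set i v ∧ (t.update i v).Wf ∧ (t.update i v).size = t.size := by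
  induction t generalizing i with
  | leaf w =>
    have h0 : i = 0 := by simp [Seg.size] at hi; omega
    subst h0
    simp [Seg.update, Seg.toList, Seg.Wf, Seg.size]
  | node sz m l r ihl ihr =>
    obtain ⟨hl, hr, hsz, _⟩ := hw
    simp only [Seg.update]
    by_cases h : i < l.size
    · rw [if_pos h]
      obtain ⟨h1, h2, h3⟩ := ihl i hl h
      refine ⟨?_, ⟨h2, hr, by rw [h3]; exact hsz, rfl⟩, rfl⟩
      rw [Seg.toList, Seg.toList, List.set_append,
        if_pos (by rw [Seg.length_toList l hl]; exact h), h1]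
    · rw [if_neg h]
      have hi' : i - l.size < r.size := by
        have hisz : i < sz := hi
        omega
      obtain ⟨h1, h2, h3⟩ := ihr (i - l.size) hr hi'
      refine ⟨?_, ⟨hl, h2, by rw [h3]; exact hsz, rfl⟩, rfl⟩
      rw [Seg.toList, Seg.toList, List.set_append,
        if_neg (by rw [Seg.length_toList l hl]; exact h), Seg.length_toList l hl, h1]

theorem Seg.build_spec (k : Nat) (hk : 1 ≤ k) :
    (Seg.build k).Wf ∧ (Seg.build k).toList = List.replicate k 0 ∧
      (Seg.build k).size = k ∧ (Seg.build k).mn = 0 := by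
  induction k using Nat.strong_induction_on with
  | _ k ih =>
    match k, hk with
    | 1, _ => simp [Seg.build, Seg.Wf, Seg.toList, Seg.size, Seg.mn, List.replicate]
    | (k+2), _ =>
      rw [Seg.build]
      have h1 := ih ((k+2)/2) (by omega) (by omega)
      have h2 := ih ((k+2) - (k+2)/2) (by omega) (by omega)
      obtain ⟨w1, t1, s1, m1⟩ := h1
      obtain ⟨w2, t2, s2, m2⟩ := h2
      refine ⟨⟨w1, w2, by omega, by rw [m1, m2]; simp⟩, ?_, by simp [Seg.size], rfl⟩
      rw [Seg.toList, t1, t2, ← List.replicate_add]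
      congr 1
      omega

theorem foldl_loop_eq (tasks : List (Int × Int × Int))
    (buzzers : List (List (Int × Int × Int))) (avail : List Int) (tree : Seg)
    (hw : tree.Wf) (ht : tree.toList = avail) :
    (tasks.foldl stepA (buzzers, avail)).1 = (tasks.foldl stepB (buzzers, tree)).1 := by
  induction tasks generalizing buzzers avail tree with
  | nil => rfl
  | cons task rest ih =>
    simp only [List.foldl_cons]
    have hq : tree.query task.2.2 = pyFindBuzzer avail task.2.2 := by
      rw [Seg.query_eq tree hw, ht, pyFindBuzzer_eq_findIdx?]
    rcases hf : pyFindBuzzer avail task.2.2 with _ | i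
    · rw [show stepA (buzzers, avail) task = (buzzers, avail) by simp [stepA, hf],
        show stepB (buzzers, tree) task = (buzzers, tree) by simp [stepB, hq, hf]]
      exact ih buzzers avail tree hw ht
    · have hi : i < avail.length := by
        rw [pyFindBuzzer_eq_findIdx?] at hf
        exact (List.findIdx?_eq_some_iff_findIdx_eq.1 hf).1
      have hi' : i < tree.size := by rw [← Seg.length_toList tree hw, ht]; exact hi
      obtain ⟨u1, u2, _⟩ := Seg.update_spec tree i (task.2.2 + task.2.1) hw hi'
      rw [show stepA (buzzers, avail) task
            = (buzzers.modify i (· ++ [task]), avail.set i (task.2.2 + task.2.1)) by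
          simp [stepA, hf],
        show stepB (buzzers, tree) task
            = (buzzers.modify i (· ++ [task]), tree.update i (task.2.2 + task.2.1)) by
          simp [stepB, hq, hf]]
      exact ih _ _ _ u2 (by rw [u1, ht])

theorem foldl_empty (tasks : List (Int × Int × Int)) :
    tasks.foldl stepA (([] : List (List (Int × Int × Int))), ([] : List Int)) = ([], []) := by
  induction tasks with
  | nil => rfl
  | cons task rest ih => simpa [stepA, pyFindBuzzer] using ih

-- ===== VERDICT (by name: the statement is the Claim_ definition above) =====
theorem distribute_tasks_spec : Claim_equal_distribute_tasks := by
  intro n tasks _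
  unfold Spec_distribute_tasks distribute_tasks distribute_tasks_alt
  by_cases hn : n ≤ 0
  · rw [if_pos hn]
    have : n.toNat = 0 := by omega
    rw [this]
    simp [List.replicate, foldl_empty]
  · rw [if_neg hn]
    obtain ⟨hw, ht, _, _⟩ := Seg.build_spec n.toNat (by omega)
    exact foldl_loop_eq tasks _ _ _ hw ht
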